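-- pv_equiv track=rewrite | github.com/anthonyceponis/british-informatics-olympiad-solutions | 2009/[2]-puzzle-game.py | removeBlocksAndGetScore
-- ===== SOURCE A (Python) =====
-- def removeBlocksAndGetScore(currentGrid, visitedTracker):
--     scores = []
--     counterPtr = [0]
--     for y in range(4):
--         for x in range(4):
--             counterPtr[0] = 0
--             explore(currentGrid, visitedTracker, x, y, counterPtr, currentGrid[y][x])
--             scores.append(max(1,counterPtr[0]))
--     score = 1
--     for i in scores:
--         score *= i
--     if score == 1: score = 0
--     return score
--
-- def explore(currentGrid, visitedTracker, x, y, counterPtr, letter):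
--     if visitedTracker[y][x] == True or currentGrid[y][x] != letter or currentGrid[y][x] == None:
--         return
--     counterPtr[0] += 1
--     visitedTracker[y][x] = True
--     if x > 0:
--         explore(currentGrid, visitedTracker, x-1, y, counterPtr, letter)
--     if x < 3:
--         explore(currentGrid, visitedTracker, x+1, y, counterPtr, letter)
--     if y < 3:
--         explore(currentGrid, visitedTracker, x, y+1, counterPtr, letter)
--     if counterPtr[0] >= 2:
--         currentGrid[y][x] = None
--     return
-- ===== SOURCE B (Python) =====
-- def removeBlocksAndGetScore(currentGrid, visitedTracker):
--     product = 1
--     for y in range(4):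
--         for x in range(4):
--             letter = currentGrid[y][x]
--             if letter is None or visitedTracker[y][x]:
--                 continue
--             # iterative flood fill: collect the whole component, then remove it
--             stack = [(x, y)]
--             comp = []
--             while stack:
--                 cx, cy = stack.pop()
--                 if visitedTracker[cy][cx] or currentGrid[cy][cx] != letter:
--                     continue
--                 visitedTracker[cy][cx] = True
--                 comp.append((cx, cy))
--                 if cy < 3: stack.append((cx, cy + 1))
--                 if cx < 3: stack.append((cx + 1, cy))
--                 if cx > 0: stack.append((cx - 1, cy))
--             size = len(comp)
--             if size >= 2:
--                 for cx, cy in comp: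
--                     currentGrid[cy][cx] = None
--                 product *= size
--     return 0 if product == 1 else product
-- ===== Notes on version B (the rewrite author's own statement) =====
-- stated objective: alternative
-- what changed: A's recursive DFS with a shared counter cell and per-cell deletion during unwinding is replaced by an iterative explicit-stack flood fill that first collects each whole component, then (if its size is at least 2) deletes it and multiplies a running product, skipping the size-1 factors entirely.
import Mathlib
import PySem

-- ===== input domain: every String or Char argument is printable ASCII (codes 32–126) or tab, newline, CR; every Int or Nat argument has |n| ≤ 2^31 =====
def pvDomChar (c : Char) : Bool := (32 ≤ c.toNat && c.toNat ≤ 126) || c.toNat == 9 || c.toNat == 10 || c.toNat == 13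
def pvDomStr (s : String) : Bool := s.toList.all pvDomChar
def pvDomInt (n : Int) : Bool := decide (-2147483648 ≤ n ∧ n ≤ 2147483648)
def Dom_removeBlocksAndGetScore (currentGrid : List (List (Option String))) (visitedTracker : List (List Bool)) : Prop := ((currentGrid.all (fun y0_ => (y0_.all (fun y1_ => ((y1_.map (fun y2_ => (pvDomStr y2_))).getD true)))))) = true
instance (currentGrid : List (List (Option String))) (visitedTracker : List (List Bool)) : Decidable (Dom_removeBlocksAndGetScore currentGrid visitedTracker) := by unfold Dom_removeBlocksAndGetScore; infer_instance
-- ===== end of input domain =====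

-- B replaces A's recursive shared-counter DFS (which deletes each cell on unwind) by an
-- iterative explicit-stack flood fill that first collects a whole component and then removes
-- it and multiplies the score; equivalence is proved for the RETURN value (both versions also
-- perform the same in-place updates of the two grids, modelled here by state threading).

-- ===== PORT A =====

-- 2-d cell access on list-of-list grids (Python's g[y][x] / g[y][x] = a; always in range under Pre_)
def cellGet {α : Type} (d : α) (g : List (List α)) (y x : Nat) : α := (g.getD y []).getD x d

def cellSet {α : Type} (g : List (List α)) (y x : Nat) (a : α) : List (List α) :=
  g.set y ((g.getD y []).set x a)

-- literal port of Python's `explore`; the recursion is bounded by fuel, and 17 (> 16 cells)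
-- is proved exact below.  State = (currentGrid, visitedTracker, counterPtr[0]).
def exploreA : Nat → Option String → Nat → Nat →
    List (List (Option String)) × List (List Bool) × Int →
    List (List (Option String)) × List (List Bool) × Int
  | 0, _, _, _, st => st
  | fuel + 1, letter, x, y, st =>
    if cellGet false st.2.1 y x = true ∨ cellGet none st.1 y x ≠ letter ∨ cellGet none st.1 y x = none then
      st
    else
      let st1 := (st.1, cellSet st.2.1 y x true, st.2.2 + 1)
      let st2 := if 0 < x then exploreA fuel letter (x - 1) y st1 else st1
      let st3 := if x < 3 then exploreA fuel letter (x + 1) y st2 else st2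
      let st4 := if y < 3 then exploreA fuel letter x (y + 1) st3 else st3
      if 2 ≤ st4.2.2 then (cellSet st4.1 y x none, st4.2.1, st4.2.2) else st4

-- body of A's inner loop: reset counter, explore, append max(1, counter)
def cellStepA (y x : Nat) (st : List (List (Option String)) × List (List Bool) × List Int) :
    List (List (Option String)) × List (List Bool) × List Int :=
  let r := exploreA 17 (cellGet none st.1 y x) x y (st.1, st.2.1, 0)
  (r.1, r.2.1, st.2.2 ++ [max 1 r.2.2])

def removeBlocksAndGetScore (currentGrid : List (List (Option String))) (visitedTracker : List (List Bool)) : Int :=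
  let fin := (List.range 4).foldl (fun st y => (List.range 4).foldl (fun st x => cellStepA y x st) st)
      (currentGrid, visitedTracker, ([] : List Int))
  let score := fin.2.2.foldl (· * ·) 1
  if score = 1 then 0 else score

-- ===== PORT B =====

-- iterative flood fill (Source B's while loop; the Lean list head is the Python stack top);
-- fuel 128 bounds the loop and is proved never to run out on admitted inputs
def floodLoop : Nat → String → List (List (Option String)) → List (List Bool) →
    List (Nat × Nat) → List (Nat × Nat) → List (List Bool) × List (Nat × Nat)
  | _, _, _, v, [], comp => (v, comp)
  | 0, _, _, v, _ :: _, comp => (v, comp)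
  | fuel + 1, l, g, v, (cx, cy) :: s, comp =>
    if cellGet false v cy cx = true ∨ cellGet none g cy cx ≠ some l then
      floodLoop fuel l g v s comp
    else
      floodLoop fuel l g (cellSet v cy cx true)
        ((if 0 < cx then [(cx - 1, cy)] else []) ++ (if cx < 3 then [(cx + 1, cy)] else []) ++
          (if cy < 3 then [(cx, cy + 1)] else []) ++ s)
        (comp ++ [(cx, cy)])

-- Source B's removal loop: for cx, cy in comp: currentGrid[cy][cx] = None
def removeAll (g : List (List (Option String))) (comp : List (Nat × Nat)) : List (List (Option String)) :=
  comp.foldl (fun g p => cellSet g p.2 p.1 none) g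

-- body of B's inner loop: skip None/visited seeds, flood, then remove and score
def cellStepB (y x : Nat) (st : List (List (Option String)) × List (List Bool) × Int) :
    List (List (Option String)) × List (List Bool) × Int :=
  match cellGet none st.1 y x with
  | none => st
  | some l =>
    if cellGet false st.2.1 y x = true then st
    else
      let r := floodLoop 128 l st.1 st.2.1 [(x, y)] []
      if 2 ≤ r.2.length then (removeAll st.1 r.2, r.1, st.2.2 * (r.2.length : Int))
      else (st.1, r.1, st.2.2)

def removeBlocksAndGetScore_alt (currentGrid : List (List (Option String))) (visitedTracker : List (List Bool)) : Int :=
  let fin := (List.range 4).foldl (fun st y => (List.range 4).foldl (fun st x => cellStepB y x st) st)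
      (currentGrid, visitedTracker, (1 : Int))
  if fin.2.2 = 1 then 0 else fin.2.2

-- ===== PRECONDITION & SPEC =====

-- Python A indexes rows 0..3 and columns 0..3 of both arguments, so it raises IndexError
-- unless both lists have at least 4 rows whose first four rows have at least 4 entries.
def Pre_removeBlocksAndGetScore (currentGrid : List (List (Option String))) (visitedTracker : List (List Bool)) : Prop :=
  4 ≤ currentGrid.length ∧ 4 ≤ visitedTracker.length ∧
  (∀ y, y < 4 → 4 ≤ (currentGrid.getD y []).length) ∧
  (∀ y, y < 4 → 4 ≤ (visitedTracker.getD y []).length)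

instance (currentGrid : List (List (Option String))) (visitedTracker : List (List Bool)) : Decidable (Pre_removeBlocksAndGetScore currentGrid visitedTracker) := by unfold Pre_removeBlocksAndGetScore; infer_instance

def pvWitness_removeBlocksAndGetScore : List (List (Option String)) × List (List Bool) :=
  ([[some "a", some "a", none, some "b"],
    [some "a", none, none, some "b"],
    [none, none, some "c", none],
    [some "c", none, some "c", some "c"]],
   [[false, false, false, false],
    [false, false, false, false],
    [false, true, false, false],
    [false, false, false, false]])

def Spec_removeBlocksAndGetScore (currentGrid : List (List (Option String))) (visitedTracker : List (List Bool)) (out : Int) : Prop := out = removeBlocksAndGetScore_alt currentGrid visitedTracker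
instance (currentGrid : List (List (Option String))) (visitedTracker : List (List Bool)) (out : Int) : Decidable (Spec_removeBlocksAndGetScore currentGrid visitedTracker out) := by unfold Spec_removeBlocksAndGetScore; infer_instance

-- ===== CLAIM (what is proved, stated in full; the proofs are below) =====
def Claim_equal_removeBlocksAndGetScore : Prop := ∀ (currentGrid : List (List (Option String))) (visitedTracker : List (List Bool)), Dom_removeBlocksAndGetScore currentGrid visitedTracker → Pre_removeBlocksAndGetScore currentGrid visitedTracker → Spec_removeBlocksAndGetScore currentGrid visitedTracker (removeBlocksAndGetScore currentGrid visitedTracker)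

-- ===== LEMMAS AND PROOFS =====

theorem getD_set_self {α : Type} (l : List α) (n : Nat) (a d : α) (h : n < l.length) :
    (l.set n a).getD n d = a := by
  rw [List.getD_eq_getElem?_getD, List.getElem?_set_self h, Option.getD_some]

theorem getD_set_ne {α : Type} (l : List α) (n m : Nat) (a d : α) (h : n ≠ m) :
    (l.set n a).getD m d = l.getD m d := by
  rw [List.getD_eq_getElem?_getD, List.getElem?_set_ne h, ← List.getD_eq_getElem?_getD]

theorem set_getD_self {α : Type} (l : List α) (n : Nat) (d : α) (h : n < l.length) :
    l.set n (l.getD n d) = l := by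
  apply List.ext_getElem?
  intro i
  by_cases hi : n = i
  · subst hi
    rw [List.getElem?_set_self h, List.getD_eq_getElem?_getD, List.getElem?_eq_getElem h,
      Option.getD_some]
  · rw [List.getElem?_set_ne hi]

theorem cellSet_def {α : Type} (g : List (List α)) (y x : Nat) (a : α) :
    cellSet g y x a = g.set y ((g.getD y []).set x a) := rfl

theorem cellGet_def {α : Type} (d : α) (g : List (List α)) (y x : Nat) :
    cellGet d g y x = (g.getD y []).getD x d := rfl

theorem cellSet_oob {α : Type} (g : List (List α)) (y x : Nat) (a : α) (h : g.length ≤ y) :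
    cellSet g y x a = g := by
  rw [cellSet_def, List.set_eq_of_length_le h]

theorem cellSet_length {α : Type} (g : List (List α)) (y x : Nat) (a : α) :
    (cellSet g y x a).length = g.length := by
  rw [cellSet_def, List.length_set]

theorem row_cellSet_self {α : Type} (g : List (List α)) (y x : Nat) (a : α) (h : y < g.length) :
    (cellSet g y x a).getD y [] = (g.getD y []).set x a := by
  rw [cellSet_def, getD_set_self _ _ _ _ h]

theorem row_cellSet_ne {α : Type} (g : List (List α)) (y x : Nat) (a : α) (y' : Nat) (h : y ≠ y') :
    (cellSet g y x a).getD y' [] = g.getD y' [] := by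
  rw [cellSet_def, getD_set_ne _ _ _ _ _ h]

theorem cellSet_row_length {α : Type} (g : List (List α)) (y x : Nat) (a : α) (y' : Nat) :
    ((cellSet g y x a).getD y' []).length = (g.getD y' []).length := by
  by_cases h : y = y'
  · subst h
    by_cases hl : y < g.length
    · rw [row_cellSet_self _ _ _ _ hl, List.length_set]
    · rw [cellSet_oob _ _ _ _ (by omega)]
  · rw [row_cellSet_ne _ _ _ _ _ h]

theorem cellGet_cellSet_self {α : Type} (d : α) (g : List (List α)) (y x : Nat) (a : α)
    (hy : y < g.length) (hx : x < (g.getD y []).length) :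
    cellGet d (cellSet g y x a) y x = a := by
  rw [cellGet_def, row_cellSet_self _ _ _ _ hy, getD_set_self _ _ _ _ hx]

theorem cellGet_cellSet_ne {α : Type} (d : α) (g : List (List α)) (b a y x : Nat) (w : α)
    (h : y ≠ b ∨ x ≠ a) :
    cellGet d (cellSet g b a w) y x = cellGet d g y x := by
  by_cases hb : b = y
  · subst hb
    have hx : x ≠ a := by tauto
    by_cases hl : b < g.length
    · rw [cellGet_def, row_cellSet_self _ _ _ _ hl, getD_set_ne _ _ _ _ _ (Ne.symm hx), cellGet_def]
    · rw [cellSet_oob _ _ _ _ (by omega)]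
  · rw [cellGet_def, row_cellSet_ne _ _ _ _ _ hb, cellGet_def]

theorem cellSet_none_comm {α : Type} (g : List (List α)) (y x b a : Nat) (w : α) :
    cellSet (cellSet g y x w) b a w = cellSet (cellSet g b a w) y x w := by
  by_cases hyb : y = b
  · subst hyb
    by_cases hxa : x = a
    · subst hxa; rfl
    · by_cases hl : y < g.length
      · rw [cellSet_def (cellSet g y x w), row_cellSet_self _ _ _ _ hl,
          cellSet_def (cellSet g y a w), row_cellSet_self _ _ _ _ hl,
          cellSet_def g y x w, cellSet_def g y a w, List.set_set, List.set_set,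
          List.set_comm _ _ hxa]
      · have e1 : cellSet g y x w = g := cellSet_oob _ _ _ _ (by omega)
        have e2 : cellSet g y a w = g := cellSet_oob _ _ _ _ (by omega)
        rw [e1, e2, e1]
  · have h1 : (cellSet g y x w).getD b [] = g.getD b [] := row_cellSet_ne _ _ _ _ _ hyb
    have h2 : (cellSet g b a w).getD y [] = g.getD y [] := row_cellSet_ne _ _ _ _ _ (Ne.symm hyb)
    rw [cellSet_def (cellSet g y x w), h1, cellSet_def (cellSet g b a w), h2,
      cellSet_def g y x w, cellSet_def g b a w]
    exact List.set_comm _ _ hyb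

theorem cellGet_cellSet_true_mono (v : List (List Bool)) (y x b a : Nat)
    (h : cellGet false v b a = true) :
    cellGet false (cellSet v y x true) b a = true := by
  by_cases hc : y = b ∧ x = a
  · obtain ⟨rfl, rfl⟩ := hc
    by_cases hl : y < v.length
    · by_cases hx : x < (v.getD y []).length
      · rw [cellGet_cellSet_self _ _ _ _ _ hl hx]
      · have h1 : (v.getD y []).set x true = v.getD y [] := List.set_eq_of_length_le (by omega)
        rw [cellSet_def, h1, set_getD_self _ _ _ hl]
        exact h
    · rw [cellSet_oob _ _ _ _ (by omega)]; exact h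
  · rw [cellGet_cellSet_ne _ _ _ _ _ _ _ (by tauto)]; exact h

-- shape of the visited grid: at least 4 rows of length ≥ 4
def Shape (v : List (List Bool)) : Prop :=
  4 ≤ v.length ∧ ∀ y, y < 4 → 4 ≤ (v.getD y []).length

theorem Shape_cellSet (v : List (List Bool)) (y x : Nat) (a : Bool) (h : Shape v) :
    Shape (cellSet v y x a) := by
  refine ⟨by rw [cellSet_length]; exact h.1, fun y' hy' => ?_⟩
  rw [cellSet_row_length]; exact h.2 y' hy'

-- the sixteen cells, and the count of unvisited ones
def pairs16 : List (Nat × Nat) := (List.range 4).flatMap (fun y => (List.range 4).map (fun x => (y, x)))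

def uc (v : List (List Bool)) : Nat := pairs16.countP (fun p => !cellGet false v p.1 p.2)

theorem mem_pairs16 (y x : Nat) : (y, x) ∈ pairs16 ↔ (y < 4 ∧ x < 4) := by
  simp only [pairs16, List.mem_flatMap, List.mem_map, List.mem_range]
  constructor
  · rintro ⟨a, ha, b, hb, h⟩
    cases h
    exact ⟨ha, hb⟩
  · rintro ⟨hy, hx⟩; exact ⟨y, hy, x, hx, rfl⟩

theorem uc_le16 (v : List (List Bool)) : uc v ≤ 16 := by
  have := List.countP_le_length (l := pairs16) (p := fun p => !cellGet false v p.1 p.2)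
  simpa [pairs16] using this

theorem uc_mono (v v' : List (List Bool))
    (h : ∀ b a, cellGet false v b a = true → cellGet false v' b a = true) : uc v' ≤ uc v := by
  apply List.countP_mono_left
  intro p _ hp
  simp only [Bool.not_eq_eq_eq_not, Bool.not_true] at *
  cases hb : cellGet false v p.1 p.2
  · rfl
  · rw [h p.1 p.2 hb] at hp; exact hp

theorem uc_split (v : List (List Bool)) (y x : Nat) (hy : y < 4) (hx : x < 4) :
    uc v = (pairs16.erase (y, x)).countP (fun p => !cellGet false v p.1 p.2)
      + (if cellGet false v y x = false then 1 else 0) := by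
  have hmem : (y, x) ∈ pairs16 := (mem_pairs16 y x).mpr ⟨hy, hx⟩
  have hperm := List.perm_cons_erase hmem
  unfold uc
  rw [hperm.countP_eq, List.countP_cons]
  cases h : cellGet false v y x <;> simp [h]

theorem uc_pos (v : List (List Bool)) (y x : Nat) (hy : y < 4) (hx : x < 4)
    (h : cellGet false v y x = false) : 1 ≤ uc v := by
  rw [uc_split v y x hy hx, h]
  simp

theorem uc_vset_lt (v : List (List Bool)) (y x : Nat) (hS : Shape v) (hy : y < 4) (hx : x < 4)
    (h : cellGet false v y x = false) : uc (cellSet v y x true) < uc v := by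
  have hnd : pairs16.Nodup := by decide
  have hne : (y, x) ∉ pairs16.erase (y, x) := hnd.not_mem_erase
  have hcongr : (pairs16.erase (y, x)).countP (fun p => !cellGet false (cellSet v y x true) p.1 p.2)
      = (pairs16.erase (y, x)).countP (fun p => !cellGet false v p.1 p.2) := by
    apply List.countP_congr
    intro p hp
    have hpp : p.1 ≠ y ∨ p.2 ≠ x := by
      by_contra hc
      push_neg at hc
      exact hne (by rw [← hc.1, ← hc.2, Prod.mk.eta] at hp ⊢; exact hp)
    rw [cellGet_cellSet_ne _ _ _ _ _ _ _ hpp]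
  have hself : cellGet false (cellSet v y x true) y x = true :=
    cellGet_cellSet_self _ _ _ _ _ (by have := hS.1; omega) (by have := hS.2 y hy; omega)
  rw [uc_split (cellSet v y x true) y x hy hx, uc_split v y x hy hx, hcongr, hself, h]
  simp

-- one-step unfolding of exploreA in fully expanded form
theorem exploreA_succ (fuel : Nat) (letter : Option String) (x y : Nat)
    (st : List (List (Option String)) × List (List Bool) × Int) :
    exploreA (fuel + 1) letter x y st =
      if cellGet false st.2.1 y x = true ∨ cellGet none st.1 y x ≠ letter ∨ cellGet none st.1 y x = none then st
      else
        if 2 ≤ (if y < 3 then exploreA fuel letter x (y + 1)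
                  (if x < 3 then exploreA fuel letter (x + 1) y
                    (if 0 < x then exploreA fuel letter (x - 1) y
                      (st.1, cellSet st.2.1 y x true, st.2.2 + 1)
                    else (st.1, cellSet st.2.1 y x true, st.2.2 + 1))
                  else (if 0 < x then exploreA fuel letter (x - 1) y
                      (st.1, cellSet st.2.1 y x true, st.2.2 + 1)
                    else (st.1, cellSet st.2.1 y x true, st.2.2 + 1)))
                else (if x < 3 then exploreA fuel letter (x + 1) y
                    (if 0 < x then exploreA fuel letter (x - 1) y
                      (st.1, cellSet st.2.1 y x true, st.2.2 + 1)
                    else (st.1, cellSet st.2.1 y x true, st.2.2 + 1))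
                  else (if 0 < x then exploreA fuel letter (x - 1) y
                      (st.1, cellSet st.2.1 y x true, st.2.2 + 1)
                    else (st.1, cellSet st.2.1 y x true, st.2.2 + 1)))).2.2
        then (cellSet (if y < 3 then exploreA fuel letter x (y + 1)
                  (if x < 3 then exploreA fuel letter (x + 1) y
                    (if 0 < x then exploreA fuel letter (x - 1) y
                      (st.1, cellSet st.2.1 y x true, st.2.2 + 1)
                    else (st.1, cellSet st.2.1 y x true, st.2.2 + 1))
                  else (if 0 < x then exploreA fuel letter (x - 1) y
                      (st.1, cellSet st.2.1 y x true, st.2.2 + 1)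
                    else (st.1, cellSet st.2.1 y x true, st.2.2 + 1)))
                else (if x < 3 then exploreA fuel letter (x + 1) y
                    (if 0 < x then exploreA fuel letter (x - 1) y
                      (st.1, cellSet st.2.1 y x true, st.2.2 + 1)
                    else (st.1, cellSet st.2.1 y x true, st.2.2 + 1))
                  else (if 0 < x then exploreA fuel letter (x - 1) y
                      (st.1, cellSet st.2.1 y x true, st.2.2 + 1)
                    else (st.1, cellSet st.2.1 y x true, st.2.2 + 1)))).1 y x none,
              (if y < 3 then exploreA fuel letter x (y + 1)
                  (if x < 3 then exploreA fuel letter (x + 1) y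
                    (if 0 < x then exploreA fuel letter (x - 1) y
                      (st.1, cellSet st.2.1 y x true, st.2.2 + 1)
                    else (st.1, cellSet st.2.1 y x true, st.2.2 + 1))
                  else (if 0 < x then exploreA fuel letter (x - 1) y
                      (st.1, cellSet st.2.1 y x true, st.2.2 + 1)
                    else (st.1, cellSet st.2.1 y x true, st.2.2 + 1)))
                else (if x < 3 then exploreA fuel letter (x + 1) y
                    (if 0 < x then exploreA fuel letter (x - 1) y
                      (st.1, cellSet st.2.1 y x true, st.2.2 + 1)
                    else (st.1, cellSet st.2.1 y x true, st.2.2 + 1))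
                  else (if 0 < x then exploreA fuel letter (x - 1) y
                      (st.1, cellSet st.2.1 y x true, st.2.2 + 1)
                    else (st.1, cellSet st.2.1 y x true, st.2.2 + 1)))).2)
        else (if y < 3 then exploreA fuel letter x (y + 1)
                  (if x < 3 then exploreA fuel letter (x + 1) y
                    (if 0 < x then exploreA fuel letter (x - 1) y
                      (st.1, cellSet st.2.1 y x true, st.2.2 + 1)
                    else (st.1, cellSet st.2.1 y x true, st.2.2 + 1))
                  else (if 0 < x then exploreA fuel letter (x - 1) y
                      (st.1, cellSet st.2.1 y x true, st.2.2 + 1)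
                    else (st.1, cellSet st.2.1 y x true, st.2.2 + 1)))
                else (if x < 3 then exploreA fuel letter (x + 1) y
                    (if 0 < x then exploreA fuel letter (x - 1) y
                      (st.1, cellSet st.2.1 y x true, st.2.2 + 1)
                    else (st.1, cellSet st.2.1 y x true, st.2.2 + 1))
                  else (if 0 < x then exploreA fuel letter (x - 1) y
                      (st.1, cellSet st.2.1 y x true, st.2.2 + 1)
                    else (st.1, cellSet st.2.1 y x true, st.2.2 + 1)))) := rfl

-- monotonicity of explore on the threaded state
def MonoSt (s t : List (List (Option String)) × List (List Bool) × Int) : Prop :=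
  (∀ b a, cellGet false s.2.1 b a = true → cellGet false t.2.1 b a = true) ∧
  s.2.2 ≤ t.2.2 ∧ (Shape s.2.1 → Shape t.2.1)

theorem MonoSt.refl (s : List (List (Option String)) × List (List Bool) × Int) : MonoSt s s :=
  ⟨fun _ _ h => h, le_refl _, id⟩

theorem MonoSt.trans {s t u : List (List (Option String)) × List (List Bool) × Int}
    (h1 : MonoSt s t) (h2 : MonoSt t u) : MonoSt s u :=
  ⟨fun b a h => h2.1 b a (h1.1 b a h), le_trans h1.2.1 h2.2.1, fun h => h2.2.2 (h1.2.2 h)⟩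

theorem exploreA_mono : ∀ (fuel : Nat) (letter : Option String) (x y : Nat)
    (st : List (List (Option String)) × List (List Bool) × Int),
    MonoSt st (exploreA fuel letter x y st) := by
  intro fuel
  induction fuel with
  | zero => intro letter x y st; exact MonoSt.refl st
  | succ fuel ih =>
    intro letter x y st
    rw [exploreA_succ]
    by_cases hg : cellGet false st.2.1 y x = true ∨ cellGet none st.1 y x ≠ letter ∨ cellGet none st.1 y x = none
    · rw [if_pos hg]; exact MonoSt.refl st
    · rw [if_neg hg]
      have hstep : ∀ (c : Prop) [Decidable c] (x' y' : Nat)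
          (st' : List (List (Option String)) × List (List Bool) × Int),
          MonoSt st' (if c then exploreA fuel letter x' y' st' else st') := by
        intro c _ x' y' st'
        split
        · exact ih letter x' y' st'
        · exact MonoSt.refl st'
      set s1 := (st.1, cellSet st.2.1 y x true, st.2.2 + 1) with hs1
      have m1 : MonoSt st s1 := by
        refine ⟨fun b a h => cellGet_cellSet_true_mono _ _ _ _ _ h, by simp [hs1], ?_⟩
        intro h; exact Shape_cellSet _ _ _ _ h
      set s2 := if 0 < x then exploreA fuel letter (x - 1) y s1 else s1 with hs2
      set s3 := if x < 3 then exploreA fuel letter (x + 1) y s2 else s2 with hs3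
      set s4 := if y < 3 then exploreA fuel letter x (y + 1) s3 else s3 with hs4
      have mall : MonoSt st s4 :=
        ((m1.trans (hs2 ▸ hstep _ _ _ s1)).trans (hs3 ▸ hstep _ _ _ s2)).trans (hs4 ▸ hstep _ _ _ s3)
      by_cases h2 : 2 ≤ s4.2.2
      · rw [if_pos h2]; exact ⟨mall.1, mall.2.1, mall.2.2⟩
      · rw [if_neg h2]; exact mall

-- the result of exploreA does not depend on the fuel once it exceeds the number of unvisited cells
theorem exploreA_fuel : ∀ (n f1 f2 : Nat) (letter : Option String) (x y : Nat)
    (st : List (List (Option String)) × List (List Bool) × Int),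
    Shape st.2.1 → x < 4 → y < 4 → uc st.2.1 ≤ n → n < f1 → n < f2 →
    exploreA f1 letter x y st = exploreA f2 letter x y st := by
  intro n
  induction n with
  | zero =>
    intro f1 f2 letter x y st hS hx hy hu h1 h2
    obtain ⟨a, rfl⟩ : ∃ a, f1 = a + 1 := ⟨f1 - 1, by omega⟩
    obtain ⟨b, rfl⟩ : ∃ b, f2 = b + 1 := ⟨f2 - 1, by omega⟩
    rw [exploreA_succ, exploreA_succ]
    by_cases hg : cellGet false st.2.1 y x = true ∨ cellGet none st.1 y x ≠ letter ∨ cellGet none st.1 y x = none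
    · rw [if_pos hg, if_pos hg]
    · exfalso
      have hv : cellGet false st.2.1 y x = false := by
        cases hb : cellGet false st.2.1 y x
        · rfl
        · exact absurd (Or.inl hb) hg
      have := uc_pos st.2.1 y x hy hx hv
      omega
  | succ n ih =>
    intro f1 f2 letter x y st hS hx hy hu h1 h2
    obtain ⟨a, rfl⟩ : ∃ a, f1 = a + 1 := ⟨f1 - 1, by omega⟩
    obtain ⟨b, rfl⟩ : ∃ b, f2 = b + 1 := ⟨f2 - 1, by omega⟩
    rw [exploreA_succ, exploreA_succ]
    by_cases hg : cellGet false st.2.1 y x = true ∨ cellGet none st.1 y x ≠ letter ∨ cellGet none st.1 y x = none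
    · rw [if_pos hg, if_pos hg]
    · rw [if_neg hg, if_neg hg]
      have hv : cellGet false st.2.1 y x = false := by
        cases hb : cellGet false st.2.1 y x
        · rfl
        · exact absurd (Or.inl hb) hg
      set s1 := (st.1, cellSet st.2.1 y x true, st.2.2 + 1) with hs1
      have hS1 : Shape s1.2.1 := Shape_cellSet _ _ _ _ hS
      have hu1 : uc s1.2.1 ≤ n := by
        have := uc_vset_lt st.2.1 y x hS hy hx hv
        show uc (cellSet st.2.1 y x true) ≤ n
        omega
      have e2 : (if 0 < x then exploreA a letter (x - 1) y s1 else s1)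
          = (if 0 < x then exploreA b letter (x - 1) y s1 else s1) := by
        split_ifs with h0
        · exact ih a b letter (x - 1) y s1 hS1 (by omega) hy hu1 (by omega) (by omega)
        · rfl
      rw [e2]
      set s2 := if 0 < x then exploreA b letter (x - 1) y s1 else s1 with hs2
      have m2 : MonoSt s1 s2 := by
        rw [hs2]; split
        · exact exploreA_mono _ _ _ _ _
        · exact MonoSt.refl _
      have hS2 : Shape s2.2.1 := m2.2.2 hS1
      have hu2 : uc s2.2.1 ≤ n := le_trans (uc_mono _ _ m2.1) hu1
      have e3 : (if x < 3 then exploreA a letter (x + 1) y s2 else s2)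
          = (if x < 3 then exploreA b letter (x + 1) y s2 else s2) := by
        split_ifs with h0
        · exact ih a b letter (x + 1) y s2 hS2 (by omega) hy hu2 (by omega) (by omega)
        · rfl
      rw [e3]
      set s3 := if x < 3 then exploreA b letter (x + 1) y s2 else s2 with hs3
      have m3 : MonoSt s2 s3 := by
        rw [hs3]; split
        · exact exploreA_mono _ _ _ _ _
        · exact MonoSt.refl _
      have hS3 : Shape s3.2.1 := m3.2.2 hS2
      have hu3 : uc s3.2.1 ≤ n := le_trans (uc_mono _ _ m3.1) hu2
      have e4 : (if y < 3 then exploreA a letter x (y + 1) s3 else s3)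
          = (if y < 3 then exploreA b letter x (y + 1) s3 else s3) := by
        split_ifs with h0
        · exact ih a b letter x (y + 1) s3 hS3 hx (by omega) hu3 (by omega) (by omega)
        · rfl
      rw [e4]

-- exploring commutes with blanking an already-visited cell of the grid
theorem exploreA_commute : ∀ (fuel : Nat) (letter : Option String) (x y : Nat)
    (g : List (List (Option String))) (v : List (List Bool)) (c : Int) (b a : Nat),
    cellGet false v b a = true →
    exploreA fuel letter x y (cellSet g b a none, v, c)
      = (cellSet (exploreA fuel letter x y (g, v, c)).1 b a none,
         (exploreA fuel letter x y (g, v, c)).2) := by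
  intro fuel
  induction fuel with
  | zero => intro letter x y g v c b a h; rfl
  | succ fuel ih =>
    intro letter x y g v c b a h
    rw [exploreA_succ, exploreA_succ]
    simp only []
    by_cases hv : cellGet false v y x = true
    · rw [if_pos (Or.inl hv), if_pos (Or.inl hv)]
    · have hne : y ≠ b ∨ x ≠ a := by
        by_contra hc
        push_neg at hc
        rw [hc.1, hc.2, h] at hv
        exact hv rfl
      have hgg : cellGet none (cellSet g b a none) y x = cellGet none g y x :=
        cellGet_cellSet_ne _ _ _ _ _ _ _ hne
      rw [hgg]
      by_cases hg : cellGet false v y x = true ∨ cellGet none g y x ≠ letter ∨ cellGet none g y x = none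
      · rw [if_pos hg, if_pos hg]
      · rw [if_neg hg, if_neg hg]
        have h1 : cellGet false (cellSet v y x true) b a = true :=
          cellGet_cellSet_true_mono _ _ _ _ _ h
        have e2 : (if 0 < x then exploreA fuel letter (x - 1) y (cellSet g b a none, cellSet v y x true, c + 1)
              else (cellSet g b a none, cellSet v y x true, c + 1))
            = (cellSet (if 0 < x then exploreA fuel letter (x - 1) y (g, cellSet v y x true, c + 1)
                  else (g, cellSet v y x true, c + 1)).1 b a none,
               (if 0 < x then exploreA fuel letter (x - 1) y (g, cellSet v y x true, c + 1)
                  else (g, cellSet v y x true, c + 1)).2) := by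
          split_ifs with h0
          · exact ih letter (x - 1) y g (cellSet v y x true) (c + 1) b a h1
          · rfl
        rw [e2]
        set S2 := if 0 < x then exploreA fuel letter (x - 1) y (g, cellSet v y x true, c + 1)
            else (g, cellSet v y x true, c + 1) with hS2
        have m2 : MonoSt (g, cellSet v y x true, c + 1) S2 := by
          rw [hS2]; split
          · exact exploreA_mono _ _ _ _ _
          · exact MonoSt.refl _
        have h2v : cellGet false S2.2.1 b a = true := m2.1 b a h1
        have e3 : (if x < 3 then exploreA fuel letter (x + 1) y (cellSet S2.1 b a none, S2.2) else (cellSet S2.1 b a none, S2.2))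
            = (cellSet (if x < 3 then exploreA fuel letter (x + 1) y S2 else S2).1 b a none,
               (if x < 3 then exploreA fuel letter (x + 1) y S2 else S2).2) := by
          split_ifs with h0
          · exact ih letter (x + 1) y S2.1 S2.2.1 S2.2.2 b a h2v
          · rfl
        rw [e3]
        set S3 := if x < 3 then exploreA fuel letter (x + 1) y S2 else S2 with hS3
        have m3 : MonoSt S2 S3 := by
          rw [hS3]; split
          · exact exploreA_mono _ _ _ _ _
          · exact MonoSt.refl _
        have h3v : cellGet false S3.2.1 b a = true := m3.1 b a h2v
        have e4 : (if y < 3 then exploreA fuel letter x (y + 1) (cellSet S3.1 b a none, S3.2) else (cellSet S3.1 b a none, S3.2))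
            = (cellSet (if y < 3 then exploreA fuel letter x (y + 1) S3 else S3).1 b a none,
               (if y < 3 then exploreA fuel letter x (y + 1) S3 else S3).2) := by
          split_ifs with h0
          · exact ih letter x (y + 1) S3.1 S3.2.1 S3.2.2 b a h3v
          · rfl
        rw [e4]
        set S4 := if y < 3 then exploreA fuel letter x (y + 1) S3 else S3 with hS4
        by_cases h2c : 2 ≤ S4.2.2
        · rw [if_pos (by simpa using h2c), if_pos h2c]
          simp only []
          rw [cellSet_none_comm]
        · rw [if_neg (by simpa using h2c), if_neg h2c]

-- chains of explore calls (the A-side image of a stack of pending cells)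
def chainA (letter : Option String) (ps : List (Nat × Nat))
    (st : List (List (Option String)) × List (List Bool) × Int) :
    List (List (Option String)) × List (List Bool) × Int :=
  ps.foldl (fun st p => exploreA 17 letter p.1 p.2 st) st

theorem chainA_nil (letter : Option String) (st : List (List (Option String)) × List (List Bool) × Int) :
    chainA letter [] st = st := rfl

theorem chainA_cons (letter : Option String) (p : Nat × Nat) (ps : List (Nat × Nat))
    (st : List (List (Option String)) × List (List Bool) × Int) :
    chainA letter (p :: ps) st = chainA letter ps (exploreA 17 letter p.1 p.2 st) := rfl

theorem chainA_append (letter : Option String) (ps qs : List (Nat × Nat))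
    (st : List (List (Option String)) × List (List Bool) × Int) :
    chainA letter (ps ++ qs) st = chainA letter qs (chainA letter ps st) := by
  unfold chainA; exact List.foldl_append

theorem chainA_mono (letter : Option String) (ps : List (Nat × Nat)) :
    ∀ (st : List (List (Option String)) × List (List Bool) × Int), MonoSt st (chainA letter ps st) := by
  induction ps with
  | nil => intro st; exact MonoSt.refl st
  | cons p ps ih =>
    intro st
    rw [chainA_cons]
    exact (exploreA_mono 17 letter p.1 p.2 st).trans (ih _)

theorem chainA_commute (letter : Option String) (ps : List (Nat × Nat)) :
    ∀ (g : List (List (Option String))) (v : List (List Bool)) (c : Int) (b a : Nat),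
    cellGet false v b a = true →
    chainA letter ps (cellSet g b a none, v, c)
      = (cellSet (chainA letter ps (g, v, c)).1 b a none, (chainA letter ps (g, v, c)).2) := by
  induction ps with
  | nil => intro g v c b a h; rfl
  | cons p ps ih =>
    intro g v c b a h
    rw [chainA_cons, chainA_cons, exploreA_commute 17 letter p.1 p.2 g v c b a h]
    exact ih (exploreA 17 letter p.1 p.2 (g, v, c)).1 (exploreA 17 letter p.1 p.2 (g, v, c)).2.1
      (exploreA 17 letter p.1 p.2 (g, v, c)).2.2 b a ((exploreA_mono 17 letter p.1 p.2 (g, v, c)).1 b a h)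

-- removeAll facts
theorem removeAll_nil (g : List (List (Option String))) : removeAll g [] = g := rfl

theorem removeAll_cons (g : List (List (Option String))) (p : Nat × Nat) (t : List (Nat × Nat)) :
    removeAll g (p :: t) = removeAll (cellSet g p.2 p.1 none) t := rfl

theorem removeAll_cellSet_comm : ∀ (t : List (Nat × Nat)) (g : List (List (Option String))) (b a : Nat),
    removeAll (cellSet g b a none) t = cellSet (removeAll g t) b a none := by
  intro t
  induction t with
  | nil => intro g b a; rfl
  | cons p t ih =>
    intro g b a
    rw [removeAll_cons, removeAll_cons, cellSet_none_comm, ih]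

-- floodLoop unfoldings and the fact that comp only grows at the tail
theorem floodLoop_nil (fuel : Nat) (l : String) (g : List (List (Option String)))
    (v : List (List Bool)) (comp : List (Nat × Nat)) :
    floodLoop fuel l g v [] comp = (v, comp) := by
  cases fuel <;> rfl

theorem floodLoop_cons (fuel : Nat) (l : String) (g : List (List (Option String)))
    (v : List (List Bool)) (cx cy : Nat) (s comp : List (Nat × Nat)) :
    floodLoop (fuel + 1) l g v ((cx, cy) :: s) comp =
      if cellGet false v cy cx = true ∨ cellGet none g cy cx ≠ some l then
        floodLoop fuel l g v s comp
      else
        floodLoop fuel l g (cellSet v cy cx true)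
          ((if 0 < cx then [(cx - 1, cy)] else []) ++ (if cx < 3 then [(cx + 1, cy)] else []) ++
            (if cy < 3 then [(cx, cy + 1)] else []) ++ s)
          (comp ++ [(cx, cy)]) := rfl

theorem floodLoop_prefix : ∀ (fuel : Nat) (l : String) (g : List (List (Option String)))
    (v : List (List Bool)) (stack comp : List (Nat × Nat)),
    ∃ t, (floodLoop fuel l g v stack comp).2 = comp ++ t := by
  intro fuel
  induction fuel with
  | zero =>
    intro l g v stack comp
    cases stack with
    | nil => exact ⟨[], by rw [floodLoop_nil]; simp⟩
    | cons p s => exact ⟨[], by cases p; simp [floodLoop]⟩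
  | succ fuel ih =>
    intro l g v stack comp
    cases stack with
    | nil => exact ⟨[], by rw [floodLoop_nil]; simp⟩
    | cons p s =>
      rcases p with ⟨cx, cy⟩
      rw [floodLoop_cons]
      by_cases hguard : cellGet false v cy cx = true ∨ cellGet none g cy cx ≠ some l
      · rw [if_pos hguard]; exact ih l g v s comp
      · rw [if_neg hguard]
        obtain ⟨t, ht⟩ := ih l g (cellSet v cy cx true)
          ((if 0 < cx then [(cx - 1, cy)] else []) ++ (if cx < 3 then [(cx + 1, cy)] else []) ++
            (if cy < 3 then [(cx, cy + 1)] else []) ++ s) (comp ++ [(cx, cy)])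
        exact ⟨(cx, cy) :: t, by rw [ht]; simp⟩

theorem exploreA_17 (letter : Option String) (x y : Nat)
    (st : List (List (Option String)) × List (List Bool) × Int) :
    exploreA 17 letter x y st =
      if cellGet false st.2.1 y x = true ∨ cellGet none st.1 y x ≠ letter ∨ cellGet none st.1 y x = none then st
      else
        if 2 ≤ (if y < 3 then exploreA 16 letter x (y + 1)
                  (if x < 3 then exploreA 16 letter (x + 1) y
                    (if 0 < x then exploreA 16 letter (x - 1) y
                      (st.1, cellSet st.2.1 y x true, st.2.2 + 1)
                    else (st.1, cellSet st.2.1 y x true, st.2.2 + 1))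
                  else (if 0 < x then exploreA 16 letter (x - 1) y
                      (st.1, cellSet st.2.1 y x true, st.2.2 + 1)
                    else (st.1, cellSet st.2.1 y x true, st.2.2 + 1)))
                else (if x < 3 then exploreA 16 letter (x + 1) y
                    (if 0 < x then exploreA 16 letter (x - 1) y
                      (st.1, cellSet st.2.1 y x true, st.2.2 + 1)
                    else (st.1, cellSet st.2.1 y x true, st.2.2 + 1))
                  else (if 0 < x then exploreA 16 letter (x - 1) y
                      (st.1, cellSet st.2.1 y x true, st.2.2 + 1)
                    else (st.1, cellSet st.2.1 y x true, st.2.2 + 1)))).2.2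
        then (cellSet (if y < 3 then exploreA 16 letter x (y + 1)
                  (if x < 3 then exploreA 16 letter (x + 1) y
                    (if 0 < x then exploreA 16 letter (x - 1) y
                      (st.1, cellSet st.2.1 y x true, st.2.2 + 1)
                    else (st.1, cellSet st.2.1 y x true, st.2.2 + 1))
                  else (if 0 < x then exploreA 16 letter (x - 1) y
                      (st.1, cellSet st.2.1 y x true, st.2.2 + 1)
                    else (st.1, cellSet st.2.1 y x true, st.2.2 + 1)))
                else (if x < 3 then exploreA 16 letter (x + 1) y
                    (if 0 < x then exploreA 16 letter (x - 1) y
                      (st.1, cellSet st.2.1 y x true, st.2.2 + 1)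
                    else (st.1, cellSet st.2.1 y x true, st.2.2 + 1))
                  else (if 0 < x then exploreA 16 letter (x - 1) y
                      (st.1, cellSet st.2.1 y x true, st.2.2 + 1)
                    else (st.1, cellSet st.2.1 y x true, st.2.2 + 1)))).1 y x none,
              (if y < 3 then exploreA 16 letter x (y + 1)
                  (if x < 3 then exploreA 16 letter (x + 1) y
                    (if 0 < x then exploreA 16 letter (x - 1) y
                      (st.1, cellSet st.2.1 y x true, st.2.2 + 1)
                    else (st.1, cellSet st.2.1 y x true, st.2.2 + 1))
                  else (if 0 < x then exploreA 16 letter (x - 1) y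
                      (st.1, cellSet st.2.1 y x true, st.2.2 + 1)
                    else (st.1, cellSet st.2.1 y x true, st.2.2 + 1)))
                else (if x < 3 then exploreA 16 letter (x + 1) y
                    (if 0 < x then exploreA 16 letter (x - 1) y
                      (st.1, cellSet st.2.1 y x true, st.2.2 + 1)
                    else (st.1, cellSet st.2.1 y x true, st.2.2 + 1))
                  else (if 0 < x then exploreA 16 letter (x - 1) y
                      (st.1, cellSet st.2.1 y x true, st.2.2 + 1)
                    else (st.1, cellSet st.2.1 y x true, st.2.2 + 1)))).2)
        else (if y < 3 then exploreA 16 letter x (y + 1)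
                  (if x < 3 then exploreA 16 letter (x + 1) y
                    (if 0 < x then exploreA 16 letter (x - 1) y
                      (st.1, cellSet st.2.1 y x true, st.2.2 + 1)
                    else (st.1, cellSet st.2.1 y x true, st.2.2 + 1))
                  else (if 0 < x then exploreA 16 letter (x - 1) y
                      (st.1, cellSet st.2.1 y x true, st.2.2 + 1)
                    else (st.1, cellSet st.2.1 y x true, st.2.2 + 1)))
                else (if x < 3 then exploreA 16 letter (x + 1) y
                    (if 0 < x then exploreA 16 letter (x - 1) y
                      (st.1, cellSet st.2.1 y x true, st.2.2 + 1)
                    else (st.1, cellSet st.2.1 y x true, st.2.2 + 1))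
                  else (if 0 < x then exploreA 16 letter (x - 1) y
                      (st.1, cellSet st.2.1 y x true, st.2.2 + 1)
                    else (st.1, cellSet st.2.1 y x true, st.2.2 + 1)))) :=
  exploreA_succ 16 letter x y st

-- the key simulation: processing a stack of pending cells by A's recursive explore
-- equals B's iterative flood loop, provided the component is already non-empty
theorem inner : ∀ (fuelB : Nat) (stack comp : List (Nat × Nat)) (gA g : List (List (Option String)))
    (v : List (List Bool)) (c : Int) (l : String),
    Shape v →
    (∀ p ∈ stack, p.1 < 4 ∧ p.2 < 4) →
    (∀ b a, b < 4 → a < 4 → cellGet false v b a = false → cellGet none gA b a = cellGet none g b a) →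
    c = (comp.length : Int) → 1 ≤ comp.length →
    4 * uc v + stack.length ≤ fuelB →
    chainA (some l) stack (gA, v, c)
      = (removeAll gA (((floodLoop fuelB l g v stack comp).2).drop comp.length),
         (floodLoop fuelB l g v stack comp).1,
         (((floodLoop fuelB l g v stack comp).2).length : Int)) := by
  intro fuelB
  induction fuelB with
  | zero =>
    intro stack comp gA g v c l hS hstack hagree hc hc1 hfuel
    have hnil : stack = [] := by
      cases stack with
      | nil => rfl
      | cons p s => simp only [List.length_cons] at hfuel; omega
    subst hnil
    subst hc
    rw [floodLoop_nil, chainA_nil]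
    simp only [List.drop_length, removeAll_nil]
  | succ n ih =>
    intro stack comp gA g v c l hS hstack hagree hc hc1 hfuel
    cases stack with
    | nil =>
      subst hc
      rw [floodLoop_nil, chainA_nil]
      simp only [List.drop_length, removeAll_nil]
    | cons p s =>
      rcases p with ⟨cx, cy⟩
      have hcx : cx < 4 := (hstack (cx, cy) (by simp)).1
      have hcy : cy < 4 := (hstack (cx, cy) (by simp)).2
      have hstack' : ∀ p ∈ s, p.1 < 4 ∧ p.2 < 4 := fun p hp => hstack p (by simp [hp])
      have hfuel' : 4 * uc v + s.length ≤ n := by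
        simp only [List.length_cons] at hfuel; omega
      rw [floodLoop_cons, chainA_cons]
      by_cases hv : cellGet false v cy cx = true
      · rw [if_pos (Or.inl hv)]
        have hEA : exploreA 17 (some l) cx cy (gA, v, c) = (gA, v, c) := by
          rw [exploreA_17]; exact if_pos (Or.inl hv)
        rw [hEA]
        exact ih s comp gA g v c l hS hstack' hagree hc hc1 hfuel'
      · have hv' : cellGet false v cy cx = false := by
          cases hb : cellGet false v cy cx
          · rfl
          · exact absurd hb hv
        by_cases hgc : cellGet none g cy cx = some l
        · -- the popped cell joins the component
          have hgA : cellGet none gA cy cx = some l := by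
            rw [hagree cy cx hcy hcx hv']; exact hgc
          rw [if_neg (by simp [hv', hgc])]
          have hguardA : ¬(cellGet false v cy cx = true ∨ cellGet none gA cy cx ≠ some l ∨
              cellGet none gA cy cx = (none : Option String)) := by
            simp [hv', hgA]
          rw [exploreA_17]
          simp only []
          rw [if_neg hguardA]
          set v1 := cellSet v cy cx true with hv1
          have hS1 : Shape v1 := Shape_cellSet _ _ _ _ hS
          have hucv : 1 ≤ uc v := uc_pos v cy cx hcy hcx hv'
          have huc1 : uc v1 < uc v := uc_vset_lt v cy cx hS hcy hcx hv'
          have huc16 : uc v1 ≤ 15 := by have := uc_le16 v; omega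
          have e2 : (if 0 < cx then exploreA 16 (some l) (cx - 1) cy (gA, v1, c + 1) else (gA, v1, c + 1))
              = chainA (some l) (if 0 < cx then [(cx - 1, cy)] else []) (gA, v1, c + 1) := by
            split_ifs with h0
            · rw [exploreA_fuel 15 16 17 (some l) (cx - 1) cy (gA, v1, c + 1) hS1 (by omega) hcy huc16 (by omega) (by omega)]
              rfl
            · rfl
          rw [e2]
          set T2 := chainA (some l) (if 0 < cx then [(cx - 1, cy)] else []) (gA, v1, c + 1) with hT2
          have m2 : MonoSt (gA, v1, c + 1) T2 := hT2 ▸ chainA_mono _ _ _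
          have hS2 : Shape T2.2.1 := m2.2.2 hS1
          have huc2 : uc T2.2.1 ≤ 15 := le_trans (uc_mono _ _ m2.1) huc16
          have e3 : (if cx < 3 then exploreA 16 (some l) (cx + 1) cy T2 else T2)
              = chainA (some l) (if cx < 3 then [(cx + 1, cy)] else []) T2 := by
            split_ifs with h0
            · rw [exploreA_fuel 15 16 17 (some l) (cx + 1) cy T2 hS2 (by omega) hcy huc2 (by omega) (by omega)]
              rfl
            · rfl
          rw [e3]
          set T3 := chainA (some l) (if cx < 3 then [(cx + 1, cy)] else []) T2 with hT3
          have m3 : MonoSt T2 T3 := hT3 ▸ chainA_mono _ _ _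
          have hS3 : Shape T3.2.1 := m3.2.2 hS2
          have huc3 : uc T3.2.1 ≤ 15 := le_trans (uc_mono _ _ m3.1) huc2
          have e4 : (if cy < 3 then exploreA 16 (some l) cx (cy + 1) T3 else T3)
              = chainA (some l) (if cy < 3 then [(cx, cy + 1)] else []) T3 := by
            split_ifs with h0
            · rw [exploreA_fuel 15 16 17 (some l) cx (cy + 1) T3 hS3 hcx (by omega) huc3 (by omega) (by omega)]
              rfl
            · rfl
          rw [e4]
          set T4 := chainA (some l) (if cy < 3 then [(cx, cy + 1)] else []) T3 with hT4
          have m4 : MonoSt T3 T4 := hT4 ▸ chainA_mono _ _ _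
          have hcge : (1 : Int) ≤ c := by rw [hc]; exact_mod_cast hc1
          have hcc : 2 ≤ T4.2.2 := by
            have h21 := ((m2.trans m3).trans m4).2.1
            simp only [] at h21
            omega
          rw [if_pos hcc]
          have hvis1 : cellGet false v1 cy cx = true :=
            cellGet_cellSet_self _ _ _ _ _ (by have := hS.1; omega) (by have := hS.2 cy hcy; omega)
          have hvis : cellGet false T4.2.1 cy cx = true := ((m2.trans m3).trans m4).1 cy cx hvis1
          have hT4chain : chainA (some l) s (cellSet T4.1 cy cx none, T4.2)
              = (cellSet (chainA (some l) s T4).1 cy cx none, (chainA (some l) s T4).2) :=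
            chainA_commute (some l) s T4.1 T4.2.1 T4.2.2 cy cx hvis
          rw [hT4chain]
          have hrw : chainA (some l) ((if 0 < cx then [(cx - 1, cy)] else []) ++ (if cx < 3 then [(cx + 1, cy)] else []) ++ (if cy < 3 then [(cx, cy + 1)] else []) ++ s)
                (gA, v1, c + 1)
              = chainA (some l) s T4 := by
            rw [chainA_append, chainA_append, chainA_append, ← hT2, ← hT3, ← hT4]
          have hstackBig : ∀ p ∈ (if 0 < cx then [(cx - 1, cy)] else []) ++ (if cx < 3 then [(cx + 1, cy)] else []) ++ (if cy < 3 then [(cx, cy + 1)] else []) ++ s,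
              p.1 < 4 ∧ p.2 < 4 := by
            intro p hp
            simp only [List.mem_append] at hp
            rcases hp with ((hp | hp) | hp) | hp
            · revert hp; split_ifs with h0 <;> intro hp <;> simp at hp
              · obtain ⟨rfl, rfl⟩ := hp; constructor <;> omega
            · revert hp; split_ifs with h0 <;> intro hp <;> simp at hp
              · obtain ⟨rfl, rfl⟩ := hp; constructor <;> omega
            · revert hp; split_ifs with h0 <;> intro hp <;> simp at hp
              · obtain ⟨rfl, rfl⟩ := hp; constructor <;> omega
            · exact hstack' p hp
          have hagree1 : ∀ b a, b < 4 → a < 4 → cellGet false v1 b a = false →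
              cellGet none gA b a = cellGet none g b a := by
            intro b a hb ha h0
            apply hagree b a hb ha
            cases hbv : cellGet false v b a
            · rfl
            · exact absurd (cellGet_cellSet_true_mono v cy cx b a hbv) (by rw [h0]; simp)
          have hcBig : c + 1 = (((comp ++ [(cx, cy)]).length : Nat) : Int) := by
            rw [hc]
            push_cast [List.length_append, List.length_cons, List.length_nil]
            ring
          have hfuelBig : 4 * uc v1 + ((if 0 < cx then [(cx - 1, cy)] else []) ++ (if cx < 3 then [(cx + 1, cy)] else []) ++ (if cy < 3 then [(cx, cy + 1)] else []) ++ s).length ≤ n := by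
            have hlen1 : (if 0 < cx then [(cx - 1, cy)] else ([] : List (Nat × Nat))).length ≤ 1 := by
              split_ifs <;> simp
            have hlen2 : (if cx < 3 then [(cx + 1, cy)] else ([] : List (Nat × Nat))).length ≤ 1 := by
              split_ifs <;> simp
            have hlen3 : (if cy < 3 then [(cx, cy + 1)] else ([] : List (Nat × Nat))).length ≤ 1 := by
              split_ifs <;> simp
            simp only [List.length_append]
            omega
          have hIH := ih ((if 0 < cx then [(cx - 1, cy)] else []) ++ (if cx < 3 then [(cx + 1, cy)] else []) ++ (if cy < 3 then [(cx, cy + 1)] else []) ++ s)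
              (comp ++ [(cx, cy)]) gA g v1 (c + 1) l hS1 hstackBig hagree1 hcBig (by simp) hfuelBig
          rw [hrw] at hIH
          rw [hIH]
          simp only []
          obtain ⟨t, ht⟩ := floodLoop_prefix n l g v1 ((if 0 < cx then [(cx - 1, cy)] else []) ++ (if cx < 3 then [(cx + 1, cy)] else []) ++ (if cy < 3 then [(cx, cy + 1)] else []) ++ s)
              (comp ++ [(cx, cy)])
          have hd1 : ((floodLoop n l g v1 ((if 0 < cx then [(cx - 1, cy)] else []) ++ (if cx < 3 then [(cx + 1, cy)] else []) ++ (if cy < 3 then [(cx, cy + 1)] else []) ++ s)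
                (comp ++ [(cx, cy)])).2).drop (comp ++ [(cx, cy)]).length = t := by
            rw [ht, List.drop_left]
          have hd0 : ((floodLoop n l g v1 ((if 0 < cx then [(cx - 1, cy)] else []) ++ (if cx < 3 then [(cx + 1, cy)] else []) ++ (if cy < 3 then [(cx, cy + 1)] else []) ++ s)
                (comp ++ [(cx, cy)])).2).drop comp.length = (cx, cy) :: t := by
            rw [ht, List.append_assoc, List.singleton_append, List.drop_left]
          rw [hd1, hd0, removeAll_cons, removeAll_cellSet_comm]
        · -- the popped cell does not match the letter
          rw [if_pos (Or.inr hgc)]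
          have hEA : exploreA 17 (some l) cx cy (gA, v, c) = (gA, v, c) := by
            rw [exploreA_17]
            apply if_pos
            right; left
            rw [hagree cy cx hcy hcx hv']
            exact hgc
          rw [hEA]
          exact ih s comp gA g v c l hS hstack' hagree hc hc1 hfuel'

-- a whole seed step: A's explore on a fresh matching cell = B's flood-collect-then-remove
theorem seed (g : List (List (Option String))) (v : List (List Bool)) (x y : Nat) (l : String)
    (hS : Shape v) (hx : x < 4) (hy : y < 4)
    (hv : cellGet false v y x = false) (hg : cellGet none g y x = some l) :
    exploreA 17 (some l) x y (g, v, 0)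
      = (if 2 ≤ (floodLoop 128 l g v [(x, y)] []).2.length then
           removeAll g (floodLoop 128 l g v [(x, y)] []).2 else g,
         (floodLoop 128 l g v [(x, y)] []).1,
         ((floodLoop 128 l g v [(x, y)] []).2.length : Int))
      ∧ 1 ≤ (floodLoop 128 l g v [(x, y)] []).2.length := by
  have hguardB : ¬(cellGet false v y x = true ∨ cellGet none g y x ≠ some l) := by simp [hv, hg]
  have hF : floodLoop 128 l g v [(x, y)] []
      = floodLoop 127 l g (cellSet v y x true)
          ((if 0 < x then [(x - 1, y)] else []) ++ (if x < 3 then [(x + 1, y)] else []) ++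
            (if y < 3 then [(x, y + 1)] else [])) [(x, y)] := by
    rw [show (128 : Nat) = 127 + 1 from rfl, floodLoop_cons, if_neg hguardB]
    simp only [List.append_nil, List.nil_append]
  rw [hF]
  obtain ⟨t, ht⟩ := floodLoop_prefix 127 l g (cellSet v y x true)
      ((if 0 < x then [(x - 1, y)] else []) ++ (if x < 3 then [(x + 1, y)] else []) ++
        (if y < 3 then [(x, y + 1)] else [])) [(x, y)]
  refine ⟨?_, by rw [ht]; simp⟩
  have hguardA : ¬(cellGet false v y x = true ∨ cellGet none g y x ≠ some l ∨
      cellGet none g y x = (none : Option String)) := by simp [hv, hg]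
  rw [exploreA_17]
  simp only []
  rw [if_neg hguardA]
  set v1 := cellSet v y x true with hv1
  have hS1 : Shape v1 := Shape_cellSet _ _ _ _ hS
  have huc1 : uc v1 < uc v := uc_vset_lt v y x hS hy hx hv
  have huc16 : uc v1 ≤ 15 := by have := uc_le16 v; omega
  have e2 : (if 0 < x then exploreA 16 (some l) (x - 1) y (g, v1, (0 : Int) + 1) else (g, v1, (0 : Int) + 1))
      = chainA (some l) (if 0 < x then [(x - 1, y)] else []) (g, v1, (0 : Int) + 1) := by
    split_ifs with h0
    · rw [exploreA_fuel 15 16 17 (some l) (x - 1) y (g, v1, (0 : Int) + 1) hS1 (by omega) hy huc16 (by omega) (by omega)]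
      rfl
    · rfl
  rw [e2]
  set T2 := chainA (some l) (if 0 < x then [(x - 1, y)] else []) (g, v1, (0 : Int) + 1) with hT2
  have m2 : MonoSt (g, v1, (0 : Int) + 1) T2 := hT2 ▸ chainA_mono _ _ _
  have hS2 : Shape T2.2.1 := m2.2.2 hS1
  have huc2 : uc T2.2.1 ≤ 15 := le_trans (uc_mono _ _ m2.1) huc16
  have e3 : (if x < 3 then exploreA 16 (some l) (x + 1) y T2 else T2)
      = chainA (some l) (if x < 3 then [(x + 1, y)] else []) T2 := by
    split_ifs with h0
    · rw [exploreA_fuel 15 16 17 (some l) (x + 1) y T2 hS2 (by omega) hy huc2 (by omega) (by omega)]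
      rfl
    · rfl
  rw [e3]
  set T3 := chainA (some l) (if x < 3 then [(x + 1, y)] else []) T2 with hT3
  have m3 : MonoSt T2 T3 := hT3 ▸ chainA_mono _ _ _
  have hS3 : Shape T3.2.1 := m3.2.2 hS2
  have huc3 : uc T3.2.1 ≤ 15 := le_trans (uc_mono _ _ m3.1) huc2
  have e4 : (if y < 3 then exploreA 16 (some l) x (y + 1) T3 else T3)
      = chainA (some l) (if y < 3 then [(x, y + 1)] else []) T3 := by
    split_ifs with h0
    · rw [exploreA_fuel 15 16 17 (some l) x (y + 1) T3 hS3 hx (by omega) huc3 (by omega) (by omega)]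
      rfl
    · rfl
  rw [e4]
  set T4 := chainA (some l) (if y < 3 then [(x, y + 1)] else []) T3 with hT4
  have hrw : chainA (some l) ((if 0 < x then [(x - 1, y)] else []) ++ (if x < 3 then [(x + 1, y)] else []) ++
        (if y < 3 then [(x, y + 1)] else [])) (g, v1, (0 : Int) + 1) = T4 := by
    rw [chainA_append, chainA_append, ← hT2, ← hT3, ← hT4]
  have hstackBig : ∀ p ∈ (if 0 < x then [(x - 1, y)] else []) ++ (if x < 3 then [(x + 1, y)] else []) ++
        (if y < 3 then [(x, y + 1)] else []), p.1 < 4 ∧ p.2 < 4 := by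
    intro p hp
    simp only [List.mem_append] at hp
    rcases hp with (hp | hp) | hp
    · revert hp; split_ifs with h0 <;> intro hp <;> simp at hp
      · obtain ⟨rfl, rfl⟩ := hp; constructor <;> omega
    · revert hp; split_ifs with h0 <;> intro hp <;> simp at hp
      · obtain ⟨rfl, rfl⟩ := hp; constructor <;> omega
    · revert hp; split_ifs with h0 <;> intro hp <;> simp at hp
      · obtain ⟨rfl, rfl⟩ := hp; constructor <;> omega
  have hfuelBig : 4 * uc v1 + ((if 0 < x then [(x - 1, y)] else []) ++ (if x < 3 then [(x + 1, y)] else []) ++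
        (if y < 3 then [(x, y + 1)] else [])).length ≤ 127 := by
    have hlen1 : (if 0 < x then [(x - 1, y)] else ([] : List (Nat × Nat))).length ≤ 1 := by
      split_ifs <;> simp
    have hlen2 : (if x < 3 then [(x + 1, y)] else ([] : List (Nat × Nat))).length ≤ 1 := by
      split_ifs <;> simp
    have hlen3 : (if y < 3 then [(x, y + 1)] else ([] : List (Nat × Nat))).length ≤ 1 := by
      split_ifs <;> simp
    have := uc_le16 v
    simp only [List.length_append]
    omega
  have hIH := inner 127 ((if 0 < x then [(x - 1, y)] else []) ++ (if x < 3 then [(x + 1, y)] else []) ++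
        (if y < 3 then [(x, y + 1)] else [])) [(x, y)] g g v1 ((0 : Int) + 1) l hS1 hstackBig
      (fun b a _ _ _ => rfl) (by simp) (by simp) hfuelBig
  rw [hrw] at hIH
  have hd1 : ((floodLoop 127 l g v1 ((if 0 < x then [(x - 1, y)] else []) ++ (if x < 3 then [(x + 1, y)] else []) ++
        (if y < 3 then [(x, y + 1)] else [])) [(x, y)]).2).drop ([(x, y)].length) = t := by
    rw [ht, List.drop_left]
  rw [hd1] at hIH
  by_cases h2 : 2 ≤ (floodLoop 127 l g v1 ((if 0 < x then [(x - 1, y)] else []) ++ (if x < 3 then [(x + 1, y)] else []) ++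
        (if y < 3 then [(x, y + 1)] else [])) [(x, y)]).2.length
  · have h2' : 2 ≤ T4.2.2 := by rw [hIH]; simp only []; exact_mod_cast h2
    rw [if_pos h2', if_pos h2, hIH]
    simp only []
    rw [ht, List.singleton_append, removeAll_cons, removeAll_cellSet_comm]
  · have h2' : ¬ 2 ≤ T4.2.2 := by rw [hIH]; simp only []; omega
    rw [if_neg h2', if_neg h2, hIH]
    have ht0 : t = [] := by
      rw [ht, List.singleton_append, List.length_cons] at h2
      have : t.length = 0 := by omega
      exact List.eq_nil_of_length_eq_zero this
    rw [ht0, removeAll_nil]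

-- one body of the outer double loop agrees between A and B
theorem step_eq (y x : Nat) (g : List (List (Option String))) (v : List (List Bool))
    (scores : List Int) (prod : Int) (hy : y < 4) (hx : x < 4) (hS : Shape v)
    (hp : scores.foldl (· * ·) 1 = prod) :
    (cellStepB y x (g, v, prod)).1 = (cellStepA y x (g, v, scores)).1
    ∧ (cellStepB y x (g, v, prod)).2.1 = (cellStepA y x (g, v, scores)).2.1
    ∧ ((cellStepA y x (g, v, scores)).2.2).foldl (· * ·) 1 = (cellStepB y x (g, v, prod)).2.2
    ∧ Shape (cellStepA y x (g, v, scores)).2.1 := by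
  cases hcell : cellGet none g y x with
  | none =>
    have hr : exploreA 17 none x y (g, v, 0) = (g, v, 0) := by
      rw [exploreA_17]
      exact if_pos (Or.inr (Or.inr hcell))
    simp only [cellStepA, cellStepB, hcell, hr]
    refine ⟨by simp, by simp, ?_, hS⟩
    rw [List.foldl_append]
    simp [hp]
  | some l =>
    by_cases hvv : cellGet false v y x = true
    · have hr : exploreA 17 (some l) x y (g, v, 0) = (g, v, 0) := by
        rw [exploreA_17]
        exact if_pos (Or.inl hvv)
      simp only [cellStepA, cellStepB, hcell, hr, if_pos hvv]
      refine ⟨by simp, by simp, ?_, hS⟩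
      rw [List.foldl_append]
      simp [hp]
    · have hv' : cellGet false v y x = false := by
        cases hb : cellGet false v y x
        · rfl
        · exact absurd hb hvv
      obtain ⟨hseed, hlen⟩ := seed g v x y l hS hx hy hv' hcell
      simp only [cellStepA, cellStepB, hcell, hseed, if_neg hvv]
      have hshape' : Shape (exploreA 17 (some l) x y (g, v, 0)).2.1 :=
        (exploreA_mono 17 (some l) x y (g, v, 0)).2.2 hS
      rw [hseed] at hshape'
      by_cases h2 : 2 ≤ (floodLoop 128 l g v [(x, y)] []).2.length
      · rw [if_pos h2, if_pos h2]
        refine ⟨by simp, by simp, ?_, hshape'⟩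
        rw [List.foldl_append]
        have hmaxk : max (1 : Int) ((floodLoop 128 l g v [(x, y)] []).2.length : Int)
            = ((floodLoop 128 l g v [(x, y)] []).2.length : Int) := by
          apply max_eq_right
          exact_mod_cast Nat.le_of_lt (by omega)
        simp [hmaxk, hp]
      · rw [if_neg h2, if_neg h2]
        refine ⟨by simp, by simp, ?_, hshape'⟩
        have hk1 : (floodLoop 128 l g v [(x, y)] []).2.length = 1 := by omega
        rw [List.foldl_append, hk1]
        simp [hp]

-- the outer loop over any list of cells, relating A's score list to B's running product
theorem outer_fold : ∀ (ps : List (Nat × Nat)) (g : List (List (Option String))) (v : List (List Bool))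
    (scores : List Int) (prod : Int),
    (∀ p ∈ ps, p.1 < 4 ∧ p.2 < 4) → Shape v → scores.foldl (· * ·) 1 = prod →
    ((ps.foldl (fun st p => cellStepB p.1 p.2 st) (g, v, prod)).1
        = (ps.foldl (fun st p => cellStepA p.1 p.2 st) (g, v, scores)).1)
    ∧ ((ps.foldl (fun st p => cellStepB p.1 p.2 st) (g, v, prod)).2.1
        = (ps.foldl (fun st p => cellStepA p.1 p.2 st) (g, v, scores)).2.1)
    ∧ ((ps.foldl (fun st p => cellStepA p.1 p.2 st) (g, v, scores)).2.2.foldl (· * ·) 1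
        = (ps.foldl (fun st p => cellStepB p.1 p.2 st) (g, v, prod)).2.2) := by
  intro ps
  induction ps with
  | nil => intro g v scores prod _ _ hp; exact ⟨rfl, rfl, hp⟩
  | cons p ps ih =>
    intro g v scores prod hb hS hp
    obtain ⟨e1, e2, e3, hS'⟩ := step_eq p.1 p.2 g v scores prod (hb p (by simp)).1 (hb p (by simp)).2 hS hp
    simp only [List.foldl_cons]
    have hB1 : cellStepB p.1 p.2 (g, v, prod)
        = ((cellStepA p.1 p.2 (g, v, scores)).1, (cellStepA p.1 p.2 (g, v, scores)).2.1,
           (cellStepB p.1 p.2 (g, v, prod)).2.2) := by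
      calc cellStepB p.1 p.2 (g, v, prod)
          = ((cellStepB p.1 p.2 (g, v, prod)).1, (cellStepB p.1 p.2 (g, v, prod)).2.1,
             (cellStepB p.1 p.2 (g, v, prod)).2.2) := rfl
        _ = _ := by rw [e1, e2]
    rw [hB1]
    exact ih (cellStepA p.1 p.2 (g, v, scores)).1 (cellStepA p.1 p.2 (g, v, scores)).2.1
      (cellStepA p.1 p.2 (g, v, scores)).2.2 (cellStepB p.1 p.2 (g, v, prod)).2.2
      (fun q hq => hb q (by simp [hq])) hS' e3

theorem foldl_flatMap' {α β σ : Type} (l : List α) (g : α → List β) (f : σ → β → σ) (i : σ) :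
    (l.flatMap g).foldl f i = l.foldl (fun s y => (g y).foldl f s) i := by
  induction l generalizing i with
  | nil => rfl
  | cons a l ih => simp [List.foldl_append, ih]

theorem fold_nested {σ : Type} (f : Nat → Nat → σ → σ) (init : σ) :
    (List.range 4).foldl (fun st y => (List.range 4).foldl (fun st x => f y x st) st) init
      = pairs16.foldl (fun st p => f p.1 p.2 st) init := by
  simp only [pairs16, foldl_flatMap', List.foldl_map]

-- ===== VERDICT (by name: the statement is the Claim_ definition above) =====
theorem removeBlocksAndGetScore_spec : Claim_equal_removeBlocksAndGetScore := by
  unfold Claim_equal_removeBlocksAndGetScore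
  intro currentGrid visitedTracker hdom hpre
  unfold Spec_removeBlocksAndGetScore
  have hShape : Shape visitedTracker := ⟨hpre.2.1, hpre.2.2.2⟩
  unfold removeBlocksAndGetScore removeBlocksAndGetScore_alt
  simp only []
  rw [fold_nested cellStepA, fold_nested cellStepB]
  obtain ⟨e1, e2, e3⟩ := outer_fold pairs16 currentGrid visitedTracker [] 1
    (fun p hp => (mem_pairs16 p.1 p.2).mp hp) hShape rfl
  rw [e3]
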